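-- pv_equiv track=rewrite | github.com/santoshmano/pybricks | dp/min_cost_stations.py | min_cost_mem
-- ===== SOURCE A (Python) =====
-- def min_cost_mem(cost, mem, start, dest):
--
--     if start >= len(cost) or dest >= len(cost):
--         return -1
--
--     if start == dest or start == dest-1:
--         return cost[start][dest]
--
--     if mem[start][dest] == -1:
--         mincost = cost[start][dest]
--         for mid in range(start+1, dest):
--             temp = min_cost_mem(cost, mem, start, mid) \
--                    + min_cost_mem(cost, mem, mid, dest)
--
--             if temp < mincost:
--                 mincost = temp
--
--             mem[start][dest] = mincost
--
--     return mem[start][dest]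
-- ===== SOURCE B (Python) =====
-- def min_cost_mem(cost, mem, start, dest):
--     n = len(cost)
--     if start >= n or dest >= n:
--         return -1
--     if start == dest or start == dest - 1:
--         return cost[start][dest]
--     if mem[start][dest] != -1:
--         return mem[start][dest]
--     if dest < start:
--         return -1
--     # bottom-up interval DP over gap sizes (no recursion, no mutation of mem)
--     f = {}
--
--     def sub(i, j):
--         if j == i + 1:
--             return cost[i][j]
--         return f[(i, j)]
--
--     for gap in range(2, dest - start + 1):
--         for i in range(start, dest - gap + 1):
--             j = i + gap
--             if mem[i][j] != -1:
--                 f[(i, j)] = mem[i][j]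
--             else:
--                 best = cost[i][j]
--                 for m in range(i + 1, j):
--                     t = sub(i, m) + sub(m, j)
--                     if t < best:
--                         best = t
--                 f[(i, j)] = best
--     return f[(start, dest)]
-- ===== Notes on version B (the rewrite author's own statement) =====
-- stated objective: alternative
-- what changed: Replaces A's memoized top-down recursion (which mutates mem in place) with an iterative bottom-up interval DP that fills a fresh table by increasing gap size, mutating nothing; return values agree on Pre_.
-- outside the precondition, e.g. on min_cost_mem([[1, 2, 3], [9, 9, 9], []], [[-1, -1, -1], [], []], 0, 2): A returns 3, B returns 3
import Mathlib
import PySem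

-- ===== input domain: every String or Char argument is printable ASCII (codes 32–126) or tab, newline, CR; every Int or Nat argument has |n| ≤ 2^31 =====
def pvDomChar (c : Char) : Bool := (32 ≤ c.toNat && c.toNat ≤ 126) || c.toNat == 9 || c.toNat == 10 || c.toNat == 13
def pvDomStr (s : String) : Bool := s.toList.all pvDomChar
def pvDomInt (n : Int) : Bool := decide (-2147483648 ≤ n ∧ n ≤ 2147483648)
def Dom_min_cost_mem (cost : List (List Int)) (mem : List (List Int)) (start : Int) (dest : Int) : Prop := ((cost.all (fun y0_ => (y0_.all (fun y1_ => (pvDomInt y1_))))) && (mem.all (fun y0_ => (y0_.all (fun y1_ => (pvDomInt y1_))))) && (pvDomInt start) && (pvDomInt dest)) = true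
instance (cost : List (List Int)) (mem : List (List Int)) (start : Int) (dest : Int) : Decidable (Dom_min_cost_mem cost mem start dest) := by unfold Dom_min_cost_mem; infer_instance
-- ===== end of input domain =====

-- B replaces A's memoized top-down interval recursion by an iterative bottom-up DP over gap
-- sizes (objective: alternative structure, no recursion, and B does not mutate `mem`).
-- A mutates `mem` in place; the equivalence proved here is about the RETURN value only.

-- ===== PORT A =====
-- m[i][j] with Python index semantics; the .getD 0 default is reached only where Python
-- raises IndexError, and such inputs are excluded by Pre_min_cost_mem.
def pyGet2 (m : List (List Int)) (i j : Int) : Int :=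
  ((PySem.List.pyGet? m i).bind (fun row => PySem.List.pyGet? row j)).getD 0

-- Pure transliteration of A's recursion. A's in-place writes `mem[start][dest] = mincost`
-- are modelled by the second component of the fold state (the cell A writes and then
-- returns); they cache values the recursion recomputes here, which cannot change the
-- return value on Pre_ (on negative indices it could, via aliasing — excluded by Pre_).
def min_cost_mem (cost : List (List Int)) (mem : List (List Int)) (start : Int) (dest : Int) : Int :=
  if start ≥ (cost.length : Int) ∨ dest ≥ (cost.length : Int) then -1
  else if start = dest ∨ start = dest - 1 then pyGet2 cost start dest
  else if pyGet2 mem start dest = -1 then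
    ((PySem.List.pyRange (start+1) dest 1).attach.foldl
        (fun (p : Int × Int) mid =>
          let temp := min_cost_mem cost mem start mid.1 + min_cost_mem cost mem mid.1 dest
          let mincost := if temp < p.1 then temp else p.1
          (mincost, mincost))
        (pyGet2 cost start dest, pyGet2 mem start dest)).2
  else pyGet2 mem start dest
termination_by (dest - start).toNat
decreasing_by
  · have h := mid.2; rw [PySem.List.mem_pyRange_one] at h; omega
  · have h := mid.2; rw [PySem.List.mem_pyRange_one] at h; omega

-- ===== PORT B =====
-- value of the sub-interval (i, j), j ≥ i+1; the table lookup's .getD 0 default is B's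
-- dict KeyError case, which never occurs for the cells B reads.
def subVal (cost : List (List Int)) (f : PySem.Dict (Int × Int) Int) (i j : Int) : Int :=
  if j = i + 1 then pyGet2 cost i j else (f.get? (i, j)).getD 0

def cellVal (cost mem : List (List Int)) (f : PySem.Dict (Int × Int) Int) (i j : Int) : Int :=
  if pyGet2 mem i j ≠ -1 then pyGet2 mem i j
  else (PySem.List.pyRange (i+1) j 1).foldl
        (fun best m =>
          let t := subVal cost f i m + subVal cost f m j
          if t < best then t else best)
        (pyGet2 cost i j)

def altTable (cost mem : List (List Int)) (start dest : Int) : PySem.Dict (Int × Int) Int :=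
  (PySem.List.pyRange 2 (dest - start + 1) 1).foldl
    (fun f gap =>
      (PySem.List.pyRange start (dest - gap + 1) 1).foldl
        (fun f i => f.insert (i, i + gap) (cellVal cost mem f i (i + gap))) f)
    PySem.Dict.empty

def min_cost_mem_alt (cost : List (List Int)) (mem : List (List Int)) (start : Int) (dest : Int) : Int :=
  if start ≥ (cost.length : Int) ∨ dest ≥ (cost.length : Int) then -1
  else if start = dest ∨ start = dest - 1 then pyGet2 cost start dest
  else if pyGet2 mem start dest ≠ -1 then pyGet2 mem start dest
  else if dest < start then -1
  else ((altTable cost mem start dest).get? (start, dest)).getD 0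

-- ===== PRECONDITION & SPEC =====
-- Pre_ admits every input on which A returns without recursing — out-of-range start/dest,
-- start = dest or dest-1 with cell cost[start][dest] readable, a readable cached (≠ -1)
-- cell mem[start][dest], and dest < start with both cells readable (negative in-range
-- indices included: all these paths do at most single reads, where Python's wraparound is
-- harmless) — plus, for the recursive case, non-negative start/dest on square matrices.
-- Pre_ excludes recursive-case inputs with negative start/dest, where A still returns a
-- value but that value is an accident of Python's negative-index wraparound aliasing with
-- A's in-place memo writes, and recursive-case ragged matrices, on which A's recursion
-- generally raises IndexError.
def Pre_min_cost_mem (cost : List (List Int)) (mem : List (List Int)) (start : Int) (dest : Int) : Prop :=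
  start ≥ (cost.length : Int) ∨ dest ≥ (cost.length : Int) ∨
  ((start = dest ∨ start = dest - 1) ∧
    ((PySem.List.pyGet? cost start).bind (fun r => PySem.List.pyGet? r dest)).isSome = true) ∨
  (start ≠ dest ∧ start ≠ dest - 1 ∧
    ((PySem.List.pyGet? mem start).bind (fun r => PySem.List.pyGet? r dest)).isSome = true ∧
    (((PySem.List.pyGet? mem start).bind (fun r => PySem.List.pyGet? r dest)).getD (-1) ≠ -1 ∨
     (dest < start ∧
      ((PySem.List.pyGet? cost start).bind (fun r => PySem.List.pyGet? r dest)).isSome = true))) ∨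
  (0 ≤ start ∧ start < (cost.length : Int) ∧ 0 ≤ dest ∧ dest < (cost.length : Int) ∧
    mem.length = cost.length ∧ (∀ r ∈ cost, r.length = cost.length) ∧
    (∀ r ∈ mem, r.length = cost.length))
instance (cost : List (List Int)) (mem : List (List Int)) (start : Int) (dest : Int) : Decidable (Pre_min_cost_mem cost mem start dest) := by unfold Pre_min_cost_mem; infer_instance

def pvWitness_min_cost_mem : List (List Int) × List (List Int) × Int × Int :=
  ([[0, 3, 9], [0, 0, 4], [0, 0, 0]], [[-1, -1, -1], [-1, -1, -1], [-1, -1, -1]], 0, 2)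

def Spec_min_cost_mem (cost : List (List Int)) (mem : List (List Int)) (start : Int) (dest : Int) (out : Int) : Prop := out = min_cost_mem_alt cost mem start dest
instance (cost : List (List Int)) (mem : List (List Int)) (start : Int) (dest : Int) (out : Int) : Decidable (Spec_min_cost_mem cost mem start dest out) := by unfold Spec_min_cost_mem; infer_instance

-- ===== CLAIM (what is proved, stated in full; the proofs are below) =====
def Claim_equal_min_cost_mem : Prop := ∀ (cost : List (List Int)) (mem : List (List Int)) (start : Int) (dest : Int), Dom_min_cost_mem cost mem start dest → Pre_min_cost_mem cost mem start dest → Spec_min_cost_mem cost mem start dest (min_cost_mem cost mem start dest)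

-- ===== LEMMAS AND PROOFS =====

-- A pair-fold whose two components coincide after the first step: its second component is
-- the plain running-minimum fold once the list is non-empty.
theorem foldl_pair_eq (g : Int → Int) :
    ∀ (l : List Int) (c x : Int), l ≠ [] →
      (l.foldl (fun (p : Int × Int) m =>
          let t := g m
          let mc := if t < p.1 then t else p.1
          (mc, mc)) (c, x))
      = (l.foldl (fun best m => let t := g m; if t < best then t else best) c,
         l.foldl (fun best m => let t := g m; if t < best then t else best) c) := by
  intro l
  induction l with
  | nil => intro c x h; exact absurd rfl h
  | cons a l ih =>
    intro c x _
    by_cases hl : l = []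
    · subst hl; simp
    · simp only [List.foldl_cons]
      exact ih _ _ hl

-- One-step unfolding of A's recursion at an interior cell (gap ≥ 2, both indices < n),
-- with the attach/pair bookkeeping removed.
theorem F_rec (cost mem : List (List Int)) (i j : Int)
    (hi : i < (cost.length : Int)) (hj : j < (cost.length : Int)) (hij : i + 2 ≤ j) :
    min_cost_mem cost mem i j =
      if pyGet2 mem i j ≠ -1 then pyGet2 mem i j
      else (PySem.List.pyRange (i+1) j 1).foldl
            (fun best m =>
              let t := min_cost_mem cost mem i m + min_cost_mem cost mem m j
              if t < best then t else best)
            (pyGet2 cost i j) := by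
  conv_lhs => rw [min_cost_mem]
  have h1 : ¬ (i ≥ (cost.length : Int) ∨ j ≥ (cost.length : Int)) := by omega
  have h2 : ¬ (i = j ∨ i = j - 1) := by omega
  rw [if_neg h1, if_neg h2]
  by_cases hm : pyGet2 mem i j = -1
  · rw [if_pos hm, if_neg (by simp [hm])]
    have hne : PySem.List.pyRange (i+1) j 1 ≠ [] := by
      intro h
      have := PySem.List.length_pyRange_one (i+1) j
      rw [h] at this; simp at this; omega
    rw [List.foldl_attach
        (f := fun (p : Int × Int) (mid : Int) =>
          let temp := min_cost_mem cost mem i mid + min_cost_mem cost mem mid j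
          let mincost := if temp < p.1 then temp else p.1
          (mincost, mincost))]
    rw [foldl_pair_eq (fun m => min_cost_mem cost mem i m + min_cost_mem cost mem m j)
          _ _ _ hne]
  · rw [if_neg hm, if_pos (by simp [hm])]

-- A at an adjacent cell.
theorem F_adj (cost mem : List (List Int)) (i : Int)
    (_hi : i < (cost.length : Int)) (hj : i + 1 < (cost.length : Int)) :
    min_cost_mem cost mem i (i+1) = pyGet2 cost i (i+1) := by
  rw [min_cost_mem]
  rw [if_neg (by omega), if_pos (by omega)]

-- The table invariant: after the outer loop has finished all gaps < gI and the inner loop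
-- of gap gI has processed the cells with left end < tI, the dict holds exactly A's values.
def tab (cost mem : List (List Int)) (start dest gI tI : Int)
    (f : PySem.Dict (Int × Int) Int) : Prop :=
  ∀ i j : Int, f.get? (i, j) =
    if start ≤ i ∧ i + 2 ≤ j ∧ j ≤ dest ∧ (j - i < gI ∨ (j - i = gI ∧ i < tI))
    then some (min_cost_mem cost mem i j) else none

theorem cellVal_eq (cost mem : List (List Int)) (start dest g t : Int)
    (hd : dest < (cost.length : Int)) (hg : 2 ≤ g) (hs : start ≤ t) (ht : t + g ≤ dest)
    (f : PySem.Dict (Int × Int) Int) (hf : tab cost mem start dest g t f) :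
    cellVal cost mem f t (t + g) = min_cost_mem cost mem t (t + g) := by
  rw [F_rec cost mem t (t+g) (by omega) (by omega) (by omega)]
  unfold cellVal
  by_cases hm : pyGet2 mem t (t+g) ≠ -1
  · rw [if_pos hm, if_pos hm]
  · rw [if_neg hm, if_neg hm]
    apply PySem.List.foldl_congr_mem'
    intro m hmem best
    rw [PySem.List.mem_pyRange_one] at hmem
    have hsub1 : subVal cost f t m = min_cost_mem cost mem t m := by
      unfold subVal
      by_cases h1 : m = t + 1
      · subst h1; rw [if_pos rfl, F_adj cost mem t (by omega) (by omega)]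
      · rw [if_neg h1, hf t m, if_pos (by omega)]
        rfl
    have hsub2 : subVal cost f m (t+g) = min_cost_mem cost mem m (t+g) := by
      unfold subVal
      by_cases h2 : t + g = m + 1
      · rw [if_pos h2, h2]
        rw [F_adj cost mem m (by omega) (by omega)]
      · rw [if_neg h2, hf m (t+g), if_pos (by omega)]
        rfl
    rw [hsub1, hsub2]

theorem inner_fold (cost mem : List (List Int)) (start dest g : Int)
    (hd : dest < (cost.length : Int)) (hg : 2 ≤ g) :
    ∀ t : Int, start ≤ t → t ≤ dest - g + 1 →
      ∀ f : PySem.Dict (Int × Int) Int, tab cost mem start dest g start f →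
      tab cost mem start dest g t
        ((PySem.List.pyRange start t 1).foldl
          (fun f i => f.insert (i, i + g) (cellVal cost mem f i (i + g))) f) := by
  intro t hst
  induction t, hst using Int.le_induction with
  | base =>
    intro _ f hf
    rw [PySem.List.pyRange_one_eq_nil (by omega)]
    exact hf
  | succ t hst ih =>
    intro hub f hf
    have hprev := ih (by omega) f hf
    rw [PySem.List.pyRange_one_succ_right hst, List.foldl_append]
    simp only [List.foldl_cons, List.foldl_nil]
    set f' := (PySem.List.pyRange start t 1).foldl
      (fun f i => f.insert (i, i + g) (cellVal cost mem f i (i + g))) f with hf'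
    have hcell : cellVal cost mem f' t (t + g) = min_cost_mem cost mem t (t + g) :=
      cellVal_eq cost mem start dest g t hd hg (by omega) (by omega) f' hprev
    intro i j
    rw [PySem.Dict.get?_insert, hcell]
    by_cases hij : (i, j) = (t, t + g)
    · rw [if_pos hij]
      obtain ⟨hi, hj⟩ := Prod.mk.injEq .. ▸ hij
      rw [if_pos (by constructor <;> omega)]
      rw [hi, hj]
    · rw [if_neg hij, hprev i j]
      have hne : ¬ (i = t ∧ j = t + g) := by
        intro ⟨h1, h2⟩; exact hij (by rw [h1, h2])
      by_cases hc : start ≤ i ∧ i + 2 ≤ j ∧ j ≤ dest ∧ (j - i < g ∨ (j - i = g ∧ i < t))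
      · rw [if_pos hc, if_pos (by omega)]
      · rw [if_neg hc, if_neg (by omega)]

theorem outer_fold (cost mem : List (List Int)) (start dest : Int)
    (hd : dest < (cost.length : Int)) :
    ∀ g : Int, 2 ≤ g → g ≤ dest - start + 1 →
      tab cost mem start dest g start
        ((PySem.List.pyRange 2 g 1).foldl
          (fun f gap =>
            (PySem.List.pyRange start (dest - gap + 1) 1).foldl
              (fun f i => f.insert (i, i + gap) (cellVal cost mem f i (i + gap))) f)
          PySem.Dict.empty) := by
  intro g hg
  induction g, hg using Int.le_induction with
  | base =>
    intro _
    rw [PySem.List.pyRange_one_eq_nil (by omega)]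
    intro i j
    rw [List.foldl_nil, PySem.Dict.get?_empty, if_neg (by omega)]
  | succ g hg ih =>
    intro hub
    have hprev := ih (by omega)
    rw [PySem.List.pyRange_one_succ_right (by omega), List.foldl_append]
    simp only [List.foldl_cons, List.foldl_nil]
    have hin := inner_fold cost mem start dest g hd hg (dest - g + 1) (by omega) (by omega)
      _ hprev
    intro i j
    rw [hin i j]
    by_cases hc : start ≤ i ∧ i + 2 ≤ j ∧ j ≤ dest ∧ (j - i < g ∨ (j - i = g ∧ i < dest - g + 1))
    · rw [if_pos hc, if_pos (by omega)]
    · rw [if_neg hc, if_neg (by omega)]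

-- ===== VERDICT (by name: the statement is the Claim_ definition above) =====
theorem min_cost_mem_spec : Claim_equal_min_cost_mem := by
  intro cost mem start dest _ _
  unfold Spec_min_cost_mem min_cost_mem_alt
  by_cases h1 : start ≥ (cost.length : Int) ∨ dest ≥ (cost.length : Int)
  · rw [min_cost_mem, if_pos h1, if_pos h1]
  · rw [if_neg h1]
    by_cases h2 : start = dest ∨ start = dest - 1
    · rw [min_cost_mem, if_neg h1, if_pos h2, if_pos h2]
    · rw [if_neg h2]
      by_cases h3 : pyGet2 mem start dest = -1
      · rw [if_neg (by simp [h3])]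
        by_cases h4 : dest < start
        · rw [if_pos h4]
          rw [min_cost_mem, if_neg h1, if_neg h2, if_pos h3]
          rw [PySem.List.pyRange_one_eq_nil (by omega)]
          simp [h3]
        · rw [if_neg h4]
          have hfull := outer_fold cost mem start dest (by omega) (dest - start + 1)
            (by omega) (by omega)
          rw [show ((altTable cost mem start dest).get? (start, dest))
                = some (min_cost_mem cost mem start dest) by
              rw [altTable.eq_def, hfull start dest, if_pos (by omega)]]
          rfl
      · rw [if_pos (by simp [h3])]
        rw [min_cost_mem, if_neg h1, if_neg h2, if_neg (by simp [h3])]
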